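-- pv_equiv track=rewrite | github.com/zoelsner/farmtopeople | archive/simple_box4.py | simplify_ingredient
-- ===== SOURCE A (Python) =====
-- def simplify_ingredient(full_name: str) -> tuple:
--     """
--     Takes a full ingredient name and returns a tuple of (full_name, simplified_name).
--     Enhanced with more ingredients including those for paleo boxes.
--     """
--     full_name = full_name.lower()
--
--     # Remove "organic" prefix which doesn't affect cooking
--     cleaned_name = full_name.replace("organic ", "")
--
--     # Look for the main ingredient in the name
--     # First try to match complete phrases
--     ingredient_mapping = {
--         "sweet potato": "sweet potato",
--         "russet potato": "potato",
--         "yukon gold potato": "potato",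
--         "potato": "potato",
--         "watermelon radish": "watermelon radish",
--         "radish": "radish",
--         "carrot": "carrot",
--         "broccoli rabe": "broccoli rabe",
--         "broccoli": "broccoli",
--         "kale": "kale",
--         "spinach": "spinach",
--         "lettuce": "lettuce",
--         "green bean": "green beans",
--         "zucchini": "zucchini",
--         "shishito pepper": "shishito pepper",
--         "bell pepper": "bell pepper",
--         "pepper": "pepper",
--         "mandarin": "mandarin",
--         "apple": "apple",
--         "banana": "banana",
--         "lemon": "lemon",
--         "chicken": "chicken",
--         "beef": "beef",
--         "pork": "pork",
--         "salmon": "salmon",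
--         "egg": "egg",
--         "mushroom": "mushroom",
--         "asparagus": "asparagus",
--         "onion": "onion",
--         "garlic": "garlic",
--         "cucumber": "cucumber",
--         "cauliflower": "cauliflower",
--         "beet": "beet",
--         "turnip": "turnip",
--         "squash": "squash",
--         "cabbage": "cabbage",
--         "brussels sprout": "brussels sprouts",
--         "ginger": "ginger",
--         "tomato": "tomato"
--     }
--
--     # Try to find the most specific match first
--     for key, value in sorted(ingredient_mapping.items(), key=lambda x: len(x[0]), reverse=True):
--         if key in cleaned_name:
--             return (full_name, value)
--
--     # If no specific match, just use the cleaned name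
--     return (full_name, cleaned_name)
-- ===== SOURCE B (Python) =====
-- # Compressed rule table: (key, replacement); replacement None means "the key itself".
-- # Stored as a flat list of rules instead of a dict; one pass tracks the longest
-- # matching key (a strict greater-than so the earliest rule wins length ties, which is exactly
-- # the stable length-descending sort's tie-breaking in the original).
-- _RULES = [
--     ("sweet potato", None),
--     ("russet potato", "potato"),
--     ("yukon gold potato", "potato"),
--     ("potato", None),
--     ("watermelon radish", None),
--     ("radish", None),
--     ("carrot", None),
--     ("broccoli rabe", None),
--     ("broccoli", None),
--     ("kale", None),
--     ("spinach", None),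
--     ("lettuce", None),
--     ("green bean", "green beans"),
--     ("zucchini", None),
--     ("shishito pepper", None),
--     ("bell pepper", None),
--     ("pepper", None),
--     ("mandarin", None),
--     ("apple", None),
--     ("banana", None),
--     ("lemon", None),
--     ("chicken", None),
--     ("beef", None),
--     ("pork", None),
--     ("salmon", None),
--     ("egg", None),
--     ("mushroom", None),
--     ("asparagus", None),
--     ("onion", None),
--     ("garlic", None),
--     ("cucumber", None),
--     ("cauliflower", None),
--     ("beet", None),
--     ("turnip", None),
--     ("squash", None),
--     ("cabbage", None),
--     ("brussels sprout", "brussels sprouts"),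
--     ("ginger", None),
--     ("tomato", None),
-- ]
--
--
-- def simplify_ingredient(full_name: str) -> tuple:
--     """
--     Takes a full ingredient name and returns a tuple of (full_name, simplified_name).
--     Single pass over a compressed rule table tracking the longest matching key,
--     instead of sorting a dict's items by key length and taking the first hit.
--     """
--     full_name = full_name.lower()
--     cleaned_name = full_name.replace("organic ", "")
--
--     best = None  # (key length, simplified value) of the longest matching rule
--     for key, repl in _RULES:
--         if key in cleaned_name and (best is None or len(key) > best[0]):
--             best = (len(key), repl if repl is not None else key)
--
--     if best is not None:
--         return (full_name, best[1])
--     return (full_name, cleaned_name)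
-- ===== Notes on version B (the rewrite author's own statement) =====
-- stated objective: simpler
-- what changed: B replaces the dict plus sort-by-key-length-descending plus first-substring-hit by a flat compressed rule table (key, optional replacement) scanned once in order, tracking the longest matching key with a strict greater-than comparison so the earliest rule wins length ties exactly like the stable reverse sort.
import Mathlib
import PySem

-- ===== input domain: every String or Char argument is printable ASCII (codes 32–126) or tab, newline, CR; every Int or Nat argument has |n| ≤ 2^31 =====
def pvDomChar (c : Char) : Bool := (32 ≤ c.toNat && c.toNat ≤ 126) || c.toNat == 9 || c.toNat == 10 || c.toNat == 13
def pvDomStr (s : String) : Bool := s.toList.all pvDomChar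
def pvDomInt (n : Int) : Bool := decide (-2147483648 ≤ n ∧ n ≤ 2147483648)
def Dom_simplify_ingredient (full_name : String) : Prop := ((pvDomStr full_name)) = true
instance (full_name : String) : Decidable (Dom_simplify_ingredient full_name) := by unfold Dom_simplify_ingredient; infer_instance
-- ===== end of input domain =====

-- B replaces A's dict + sort-by-key-length + first-substring-hit by a flat compressed
-- rule table ((key, optional replacement)) scanned once, tracking the longest matching
-- key (strict greater-than, earliest rule wins length ties); objective: simpler (no sort).

-- ===== PORT A =====
-- A's ingredient_mapping dict literal (distinct keys, insertion order)
def pvMapping : List (String × String) :=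
  [("sweet potato", "sweet potato"), ("russet potato", "potato"), ("yukon gold potato", "potato"),
   ("potato", "potato"), ("watermelon radish", "watermelon radish"), ("radish", "radish"),
   ("carrot", "carrot"), ("broccoli rabe", "broccoli rabe"), ("broccoli", "broccoli"),
   ("kale", "kale"), ("spinach", "spinach"), ("lettuce", "lettuce"), ("green bean", "green beans"),
   ("zucchini", "zucchini"), ("shishito pepper", "shishito pepper"), ("bell pepper", "bell pepper"),
   ("pepper", "pepper"), ("mandarin", "mandarin"), ("apple", "apple"), ("banana", "banana"),
   ("lemon", "lemon"), ("chicken", "chicken"), ("beef", "beef"), ("pork", "pork"),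
   ("salmon", "salmon"), ("egg", "egg"), ("mushroom", "mushroom"), ("asparagus", "asparagus"),
   ("onion", "onion"), ("garlic", "garlic"), ("cucumber", "cucumber"),
   ("cauliflower", "cauliflower"), ("beet", "beet"), ("turnip", "turnip"), ("squash", "squash"),
   ("cabbage", "cabbage"), ("brussels sprout", "brussels sprouts"), ("ginger", "ginger"),
   ("tomato", "tomato")]

def simplify_ingredient (full_name : String) : String × String :=
  let fn := PySem.Str.lower full_name
  let cleaned := PySem.Str.replace fn "organic " ""
  -- 'for key, value in sorted(items, key=len(key), reverse=True): if key in cleaned: return'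
  match (PySem.List.sorted pvMapping (fun p => PySem.Str.len p.1) true).find?
      (fun p => PySem.Str.isIn p.1 cleaned) with
  | some p => (fn, p.2)
  | none => (fn, cleaned)

-- ===== PORT B =====
-- B's compressed rule table: (key, optional replacement); none = "the key itself"
def pvRules : List (String × Option String) :=
  [("sweet potato", none), ("russet potato", some "potato"), ("yukon gold potato", some "potato"),
   ("potato", none), ("watermelon radish", none), ("radish", none), ("carrot", none),
   ("broccoli rabe", none), ("broccoli", none), ("kale", none), ("spinach", none),
   ("lettuce", none), ("green bean", some "green beans"), ("zucchini", none),
   ("shishito pepper", none), ("bell pepper", none), ("pepper", none), ("mandarin", none),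
   ("apple", none), ("banana", none), ("lemon", none), ("chicken", none), ("beef", none),
   ("pork", none), ("salmon", none), ("egg", none), ("mushroom", none), ("asparagus", none),
   ("onion", none), ("garlic", none), ("cucumber", none), ("cauliflower", none),
   ("beet", none), ("turnip", none), ("squash", none), ("cabbage", none),
   ("brussels sprout", some "brussels sprouts"), ("ginger", none), ("tomato", none)]

-- one step of B's loop: keep (key length, simplified value) of the longest match so far
def pvBest (cleaned : String) (best : Option (Int × String)) (r : String × Option String) :
    Option (Int × String) :=
  if PySem.Str.isIn r.1 cleaned &&
      decide ((match best with | none => (-1 : Int) | some b => b.1) < PySem.Str.len r.1)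
  then some (PySem.Str.len r.1, r.2.getD r.1) else best

def simplify_ingredient_alt (full_name : String) : String × String :=
  let fn := PySem.Str.lower full_name
  let cleaned := PySem.Str.replace fn "organic " ""
  match pvRules.foldl (pvBest cleaned) none with
  | some b => (fn, b.2)
  | none => (fn, cleaned)

-- ===== PRECONDITION & SPEC =====
def Spec_simplify_ingredient (full_name : String) (out : String × String) : Prop := out = simplify_ingredient_alt full_name
instance (full_name : String) (out : String × String) : Decidable (Spec_simplify_ingredient full_name out) := by unfold Spec_simplify_ingredient; infer_instance

-- ===== CLAIM =====
def Claim_equal_simplify_ingredient : Prop := ∀ (full_name : String), Dom_simplify_ingredient full_name → Spec_simplify_ingredient full_name (simplify_ingredient full_name)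

-- ===== LEMMAS AND PROOFS =====

-- abstract one-pass step over resolved (key, value) pairs, for the proof only
def pvStep {α : Type} (pred : α → Bool) (f : α → Int) (acc : Option α) (p : α) : Option α :=
  if pred p && (match acc with | none => true | some q => decide (f q < f p)) then some p else acc

-- resolve a compressed rule to the (key, value) pair of A's dict
def pvResolve (r : String × Option String) : String × String := (r.1, r.2.getD r.1)

-- B's concrete loop is the abstract pvStep loop over the resolved rules
theorem pv_best_eq_step (cleaned : String) (L : List (String × Option String)) :
    ∀ acc : Option (String × String),
      L.foldl (pvBest cleaned) (acc.map (fun q => (PySem.Str.len q.1, q.2)))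
        = ((L.map pvResolve).foldl
            (pvStep (fun p => PySem.Str.isIn p.1 cleaned) (fun p => PySem.Str.len p.1)) acc).map
          (fun q => (PySem.Str.len q.1, q.2)) := by
  induction L with
  | nil => intro acc; simp
  | cons r t ih =>
    intro acc
    rw [List.foldl_cons, List.map_cons, List.foldl_cons]
    have hstep : pvBest cleaned (acc.map (fun q => (PySem.Str.len q.1, q.2))) r
        = (pvStep (fun p => PySem.Str.isIn p.1 cleaned) (fun p => PySem.Str.len p.1) acc
            (pvResolve r)).map (fun q => (PySem.Str.len q.1, q.2)) := by
      cases acc with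
      | none =>
        have h0 : (-1 : Int) < (r.1.length : Int) := by omega
        by_cases hp : PySem.Chars.isIn r.1.toList cleaned.toList <;>
          simp [pvBest, pvStep, pvResolve, hp, h0]
      | some q =>
        by_cases hp : PySem.Chars.isIn r.1.toList cleaned.toList <;>
          by_cases hlt : q.1.length < r.1.length <;>
            simp [pvBest, pvStep, pvResolve, hp, hlt]
    rw [hstep, ih]

-- leftmost element of maximal f-value ('first max'), the common characterisation
def pvFM {α : Type} (f : α → Int) : List α → Option α
  | [] => none
  | p :: t => match pvFM f t with
      | none => some p
      | some q => if f p < f q then some q else some p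

-- how the accumulator combines with the first-max of the rest of the list
def pvCombine {α : Type} (f : α → Int) (acc r : Option α) : Option α :=
  match acc, r with
  | none, r => r
  | some q, none => some q
  | some q, some r => if f q < f r then some r else some q

theorem pvCombine_none {α : Type} (f : α → Int) (r : Option α) : pvCombine f none r = r := by
  cases r <;> rfl

theorem pvFM_mem {α : Type} (f : α → Int) (M : List α) (q : α) (h : pvFM f M = some q) : q ∈ M := by
  induction M with
  | nil => simp [pvFM] at h
  | cons p t ih =>
    rw [pvFM] at h
    cases hq : pvFM f t with
    | none => rw [hq] at h; simp at h; simp [h]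
    | some r =>
      rw [hq] at h
      by_cases hlt : f p < f r
      · simp [hlt] at h; subst h; exact List.mem_cons_of_mem _ (ih hq)
      · simp [hlt] at h; simp [h]

-- the pvStep loop computes the first-max of the pred-filtered list
theorem pv_foldl_step {α : Type} (pred : α → Bool) (f : α → Int) (M : List α) :
    ∀ acc, M.foldl (pvStep pred f) acc = pvCombine f acc (pvFM f (M.filter pred)) := by
  induction M with
  | nil => intro acc; cases acc <;> simp [pvCombine, pvFM]
  | cons p t ih =>
    intro acc
    rw [List.foldl_cons, ih]
    by_cases hp : pred p
    · have hfil : (p :: t).filter pred = p :: t.filter pred := by simp [hp]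
      rw [hfil, pvFM]
      cases acc with
      | none =>
        cases hq : pvFM f (t.filter pred) with
        | none => simp [pvStep, pvCombine, hp]
        | some q =>
          by_cases h2 : f p < f q <;> simp [pvStep, pvCombine, hp, h2]
      | some a =>
        cases hq : pvFM f (t.filter pred) with
        | none =>
          by_cases h1 : f a < f p <;> simp [pvStep, pvCombine, hp, h1]
        | some q =>
          by_cases h1 : f a < f p <;> by_cases h2 : f p < f q <;> by_cases h3 : f a < f q <;>
            simp [pvStep, pvCombine, hp, h1, h2, h3] <;> omega
    · have hfil : (p :: t).filter pred = t.filter pred := by simp [hp]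
      rw [hfil]
      have hstep : pvStep pred f acc p = acc := by simp [pvStep, hp]
      rw [hstep]

-- on a list sorted by non-increasing f, the first pred-element is the first max of the filtered list
theorem pv_find?_sorted {α : Type} (pred : α → Bool) (f : α → Int) (S : List α)
    (hs : S.Pairwise (fun a b => f b ≤ f a)) :
    S.find? pred = pvFM f (S.filter pred) := by
  induction S with
  | nil => simp [pvFM]
  | cons p t ih =>
    rw [List.pairwise_cons] at hs
    by_cases hp : pred p
    · have hfind : (p :: t).find? pred = some p := by simp [hp]
      rw [hfind]
      have hfil : (p :: t).filter pred = p :: t.filter pred := by simp [hp]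
      rw [hfil, pvFM]
      cases hq : pvFM f (t.filter pred) with
      | none => rfl
      | some q =>
        have hqm : q ∈ t := List.mem_of_mem_filter (pvFM_mem f _ q hq)
        have hnlt : ¬ f p < f q := by have := hs.1 q hqm; omega
        simp [hnlt]
    · have hfind : (p :: t).find? pred = t.find? pred := by simp [hp]
      have hfil : (p :: t).filter pred = t.filter pred := by simp [hp]
      rw [hfind, hfil, ih hs.2]

def pvMaxf {α : Type} (f : α → Int) : List α → Int
  | [] => 0
  | p :: t => max (f p) (pvMaxf f t)

theorem pv_le_maxf {α : Type} (f : α → Int) (M : List α) : ∀ p ∈ M, f p ≤ pvMaxf f M := by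
  induction M with
  | nil => simp
  | cons p t ih =>
    intro q hq
    rcases List.mem_cons.mp hq with h | h
    · subst h; simp [pvMaxf]
    · have := ih q h; simp [pvMaxf]; omega

theorem pv_maxf_attained {α : Type} (f : α → Int) (M : List α)
    (hnn : ∀ p ∈ M, 0 ≤ f p) (h : M ≠ []) :
    ∃ p ∈ M, f p = pvMaxf f M := by
  induction M with
  | nil => exact absurd rfl h
  | cons p t ih =>
    by_cases hle : pvMaxf f t ≤ f p
    · refine ⟨p, List.mem_cons_self, ?_⟩
      simp [pvMaxf]; omega
    · have ht : t ≠ [] := by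
        intro hnil; subst hnil
        exact hle (le_trans (by simp [pvMaxf]) (hnn p List.mem_cons_self))
      rcases ih (fun q hq => hnn q (List.mem_cons_of_mem _ hq)) ht with ⟨q, hq, hfq⟩
      refine ⟨q, List.mem_cons_of_mem _ hq, ?_⟩
      simp [pvMaxf]; omega

theorem pvFM_eq_head_filter {α : Type} (f : α → Int) (m : Int) (M : List α)
    (hb : ∀ p ∈ M, f p ≤ m) (hne : M.filter (fun a => decide (f a = m)) ≠ []) :
    pvFM f M = (M.filter (fun a => decide (f a = m))).head? := by
  induction M with
  | nil => simp at hne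
  | cons p t ih =>
    by_cases hm : f p = m
    · have hfil : (p :: t).filter (fun a => decide (f a = m)) = p :: t.filter (fun a => decide (f a = m)) := by
        simp [hm]
      rw [hfil, pvFM]
      cases hq : pvFM f t with
      | none => rfl
      | some q =>
        have hqm : q ∈ t := pvFM_mem f t q hq
        have hnlt : ¬ f p < f q := by have := hb q (List.mem_cons_of_mem _ hqm); omega
        simp [hnlt]
    · have hfil : (p :: t).filter (fun a => decide (f a = m)) = t.filter (fun a => decide (f a = m)) := by
        simp [hm]
      rw [hfil] at hne ⊢
      have hb' : ∀ q ∈ t, f q ≤ m := fun q hq => hb q (List.mem_cons_of_mem _ hq)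
      have ihh := ih hb' hne
      cases hfe : t.filter (fun a => decide (f a = m)) with
      | nil => exact absurd hfe hne
      | cons q0 r =>
        have hq0 : q0 ∈ t.filter (fun a => decide (f a = m)) := by rw [hfe]; exact List.mem_cons_self
        have hq0m : f q0 = m := by simpa using (List.mem_filter.mp hq0).2
        rw [pvFM, ihh, hfe]
        have hlt : f p < f q0 := by have := hb p List.mem_cons_self; omega
        simp [hlt]

-- first-max only depends on the f-fibers of the list
theorem pvFM_congr {α : Type} (f : α → Int) (M N : List α)
    (hnn : ∀ p ∈ M, 0 ≤ f p)
    (hfib : ∀ n, M.filter (fun a => decide (f a = n)) = N.filter (fun a => decide (f a = n))) :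
    pvFM f M = pvFM f N := by
  cases hM : M with
  | nil =>
    cases hN : N with
    | nil => rfl
    | cons q t =>
      have h := hfib (f q)
      rw [hM, hN] at h
      simp at h
  | cons p t =>
    rw [← hM]
    have hMne : M ≠ [] := by rw [hM]; simp
    rcases pv_maxf_attained f M hnn hMne with ⟨w, hw, hfw⟩
    have hbM : ∀ q ∈ M, f q ≤ pvMaxf f M := pv_le_maxf f M
    have hneM : M.filter (fun a => decide (f a = pvMaxf f M)) ≠ [] := by
      intro hnil
      have hmem : w ∈ M.filter (fun a => decide (f a = pvMaxf f M)) :=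
        List.mem_filter.mpr ⟨hw, by simp [hfw]⟩
      rw [hnil] at hmem; simp at hmem
    have hbN : ∀ q ∈ N, f q ≤ pvMaxf f M := by
      intro q hq
      have hqf : q ∈ N.filter (fun a => decide (f a = f q)) := List.mem_filter.mpr ⟨hq, by simp⟩
      rw [← hfib (f q)] at hqf
      exact hbM q (List.mem_of_mem_filter hqf)
    have hneN : N.filter (fun a => decide (f a = pvMaxf f M)) ≠ [] := by
      rw [← hfib (pvMaxf f M)]; exact hneM
    rw [pvFM_eq_head_filter f (pvMaxf f M) M hbM hneM,
        pvFM_eq_head_filter f (pvMaxf f M) N hbN hneN, hfib (pvMaxf f M)]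

-- the sorted mapping, as a literal (checked by kernel evaluation in pv_sorted_eq)
def pvSorted : List (String × String) :=
  [("yukon gold potato", "potato"), ("watermelon radish", "watermelon radish"),
   ("shishito pepper", "shishito pepper"), ("brussels sprout", "brussels sprouts"),
   ("russet potato", "potato"), ("broccoli rabe", "broccoli rabe"), ("sweet potato", "sweet potato"),
   ("bell pepper", "bell pepper"), ("cauliflower", "cauliflower"), ("green bean", "green beans"),
   ("asparagus", "asparagus"), ("broccoli", "broccoli"), ("zucchini", "zucchini"),
   ("mandarin", "mandarin"), ("mushroom", "mushroom"), ("cucumber", "cucumber"),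
   ("spinach", "spinach"), ("lettuce", "lettuce"), ("chicken", "chicken"), ("cabbage", "cabbage"),
   ("potato", "potato"), ("radish", "radish"), ("carrot", "carrot"), ("pepper", "pepper"),
   ("banana", "banana"), ("salmon", "salmon"), ("garlic", "garlic"), ("turnip", "turnip"),
   ("squash", "squash"), ("ginger", "ginger"), ("tomato", "tomato"), ("apple", "apple"),
   ("lemon", "lemon"), ("onion", "onion"), ("kale", "kale"), ("beef", "beef"), ("pork", "pork"),
   ("beet", "beet"), ("egg", "egg")]

theorem pv_sorted_eq : PySem.List.sorted pvMapping (fun p => PySem.Str.len p.1) true = pvSorted := by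
  decide

theorem pv_sorted_pairwise : pvSorted.Pairwise (fun a b => PySem.Str.len b.1 ≤ PySem.Str.len a.1) := by
  decide

theorem pv_rules_resolve : pvRules.map pvResolve = pvMapping := by decide

theorem pv_fiber_small : ∀ n : Int, 0 ≤ n → n < 18 →
    pvSorted.filter (fun a => decide (PySem.Str.len a.1 = n)) =
      pvMapping.filter (fun a => decide (PySem.Str.len a.1 = n)) := by
  intro n h0 h18
  lift n to Nat using h0
  have h18' : n < 18 := by exact_mod_cast h18
  interval_cases n <;> decide

theorem pv_len_bound : (∀ p ∈ pvSorted, 0 ≤ PySem.Str.len p.1 ∧ PySem.Str.len p.1 < 18) ∧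
    (∀ p ∈ pvMapping, 0 ≤ PySem.Str.len p.1 ∧ PySem.Str.len p.1 < 18) := by
  decide

theorem pv_fiber : ∀ n : Int,
    pvSorted.filter (fun a => decide (PySem.Str.len a.1 = n)) =
      pvMapping.filter (fun a => decide (PySem.Str.len a.1 = n)) := by
  intro n
  by_cases hn : 0 ≤ n ∧ n < 18
  · exact pv_fiber_small n hn.1 hn.2
  · have h1 : pvSorted.filter (fun a => decide (PySem.Str.len a.1 = n)) = [] := by
      rw [List.filter_eq_nil_iff]
      intro a ha
      have hb := pv_len_bound.1 a ha
      simp only [decide_eq_true_eq]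
      omega
    have h2 : pvMapping.filter (fun a => decide (PySem.Str.len a.1 = n)) = [] := by
      rw [List.filter_eq_nil_iff]
      intro a ha
      have hb := pv_len_bound.2 a ha
      simp only [decide_eq_true_eq]
      omega
    rw [h1, h2]

-- the crux: A's first hit in the length-sorted list = the longest match of a single pass
theorem pv_key (pred : String × String → Bool) :
    (PySem.List.sorted pvMapping (fun p => PySem.Str.len p.1) true).find? pred
      = pvMapping.foldl (pvStep pred (fun p : String × String => PySem.Str.len p.1)) none := by
  rw [pv_sorted_eq,
      pv_find?_sorted pred (fun p : String × String => PySem.Str.len p.1) pvSorted pv_sorted_pairwise,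
      pv_foldl_step pred (fun p : String × String => PySem.Str.len p.1) pvMapping none,
      pvCombine_none]
  refine pvFM_congr (fun p : String × String => PySem.Str.len p.1) _ _ ?_ ?_
  · intro p hp
    exact (pv_len_bound.1 p (List.mem_of_mem_filter hp)).1
  · intro n
    have h := congrArg (List.filter pred) (pv_fiber n)
    simpa [List.filter_filter, Bool.and_comm] using h

-- ===== VERDICT =====
theorem simplify_ingredient_spec : Claim_equal_simplify_ingredient := by
  intro full_name _
  unfold Spec_simplify_ingredient
  simp only [simplify_ingredient, simplify_ingredient_alt]
  rw [pv_key]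
  have h := pv_best_eq_step (PySem.Str.replace (PySem.Str.lower full_name) "organic " "")
    pvRules none
  rw [pv_rules_resolve] at h
  rw [show (Option.map (fun q : String × String => (PySem.Str.len q.1, q.2)) none
        = (none : Option (Int × String))) from rfl] at h
  rw [h]
  cases pvMapping.foldl
      (pvStep (fun p => PySem.Str.isIn p.1 (PySem.Str.replace (PySem.Str.lower full_name) "organic " ""))
        (fun p : String × String => PySem.Str.len p.1)) none <;> rfl
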